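-- pv_equiv track=rewrite | github.com/Daothecreator/ABSOLUTE | government_data_integration.py | _extract_person_names
-- ===== SOURCE A (Python) =====
-- from typing import Dict, List, Optional, Set, Any, Callable
--
-- def _extract_person_names(data: Dict) -> Set[str]:
--     """Extract person names from record data"""
--     names = set()
--
--     # Common field names for people
--     person_fields = [
--         'inventor_first_name', 'inventor_last_name', 'officer',
--         'director', 'signatory', 'lobbyist', 'candidate_name'
--     ]
--
--     for field in person_fields:
--         if field in data and data[field]:
--             if isinstance(data[field], str):
--                 names.add(data[field])
--             elif isinstance(data[field], list):
--                 names.update(data[field])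
--
--     return names
-- ===== SOURCE B (Python) =====
-- # B: one set-comprehension flattening data.get(f, []) over the known fields
-- # (domain: dict values are lists of strings, so A's str branch never fires).
-- _PERSON_FIELDS = [
--     'inventor_first_name', 'inventor_last_name', 'officer',
--     'director', 'signatory', 'lobbyist', 'candidate_name'
-- ]
--
-- def _extract_person_names(data):
--     return {name for f in _PERSON_FIELDS for name in data.get(f, [])}
-- ===== Notes on version B (the rewrite author's own statement) =====
-- stated objective: idiomatic
-- what changed: Replaces the explicit loop with membership test, truthiness check, type dispatch and set mutation by a single set comprehension flattening data.get(f, []) over the known fields (values are lists of strings in this domain).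
import Mathlib
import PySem

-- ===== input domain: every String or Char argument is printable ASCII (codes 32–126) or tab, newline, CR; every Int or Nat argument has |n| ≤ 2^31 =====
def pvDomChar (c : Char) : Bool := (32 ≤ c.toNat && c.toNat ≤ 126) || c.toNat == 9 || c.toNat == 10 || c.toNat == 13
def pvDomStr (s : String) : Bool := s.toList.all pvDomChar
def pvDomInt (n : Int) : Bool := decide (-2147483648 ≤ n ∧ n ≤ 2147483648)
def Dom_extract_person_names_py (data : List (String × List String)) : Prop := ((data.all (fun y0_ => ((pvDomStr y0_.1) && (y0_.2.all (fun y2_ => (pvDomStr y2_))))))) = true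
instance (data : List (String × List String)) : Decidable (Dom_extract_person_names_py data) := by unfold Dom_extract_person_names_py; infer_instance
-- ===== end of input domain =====

-- B replaces A's explicit loop (membership test, truthiness check, type dispatch, set
-- mutation) by a single set comprehension flattening data.get(f, []) over the known
-- fields; in this domain the dict's values are lists of strings, so A's str branch is dead.

-- ===== PORT A =====
def pvPersonFields : List String :=
  ["inventor_first_name", "inventor_last_name", "officer",
   "director", "signatory", "lobbyist", "candidate_name"]

-- transliteration of A; `isinstance(data[field], str)` is statically false for
-- values of type List String, so only the list branch (`names.update`) remains
def extract_person_names_py (data : List (String × List String)) : List String :=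
  let d := PySem.Dict.mk data
  pvPersonFields.foldl
    (fun names field =>
      if d.contains field && !(d.getD field []).isEmpty then
        PySem.Set.update names (d.getD field [])
      else names)
    PySem.Set.empty

-- ===== PORT B =====
def extract_person_names_py_alt (data : List (String × List String)) : List String :=
  PySem.Set.ofList (pvPersonFields.flatMap (fun f => (PySem.Dict.mk data).getD f []))

-- ===== PRECONDITION & SPEC =====
def Spec_extract_person_names_py (data : List (String × List String)) (out : List String) : Prop := out = extract_person_names_py_alt data
instance (data : List (String × List String)) (out : List String) : Decidable (Spec_extract_person_names_py data out) := by unfold Spec_extract_person_names_py; infer_instance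

-- ===== CLAIM (what is proved, stated in full; the proofs are below) =====
def Claim_equal_extract_person_names_py : Prop := ∀ (data : List (String × List String)), Dom_extract_person_names_py data → Spec_extract_person_names_py data (extract_person_names_py data)

-- ===== LEMMAS AND PROOFS =====

-- one step of A's loop is exactly a Set.update with the flattened chunk
theorem pv_step_eq (d : PySem.Dict String (List String)) (names : List String) (f : String) :
    (if d.contains f && !(d.getD f []).isEmpty then
        PySem.Set.update names (d.getD f [])
      else names)
    = PySem.Set.update names (d.getD f []) := by
  by_cases hc : d.contains f && !(d.getD f []).isEmpty
  · simp [hc]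
  · have : d.getD f [] = [] := by
      rcases Bool.and_eq_false_iff.mp (Bool.eq_false_iff.mpr hc) with h | h
      · simp [PySem.Dict.getD_of_not_contains, (by simpa using h : d.contains f = false)]
      · simpa using h
    simp [this, PySem.Set.update_nil]

-- A's fold over the fields equals updating with the flattened lists
theorem pv_fold_eq (d : PySem.Dict String (List String)) (fs : List String) (s : List String) :
    fs.foldl (fun names field => PySem.Set.update names (d.getD field [])) s
    = PySem.Set.update s (fs.flatMap (fun f => d.getD f [])) := by
  induction fs generalizing s with
  | nil => simp [PySem.Set.update_nil]
  | cons f fs ih =>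
      simp only [List.foldl_cons, List.flatMap_cons]
      rw [ih, PySem.Set.update_append]

-- ===== VERDICT (by name: the statement is the Claim_ definition above) =====
theorem extract_person_names_py_spec : Claim_equal_extract_person_names_py := by
  intro data _
  show extract_person_names_py data = extract_person_names_py_alt data
  unfold extract_person_names_py extract_person_names_py_alt
  simp only [pv_step_eq]
  rw [pv_fold_eq]
  simp [PySem.Set.empty, PySem.Set.update_nil_left]
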